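-- pv_equiv track=rewrite | github.com/tklijnsma/bookit | bookit/__init__.py | yield_code_blocks
-- ===== SOURCE A (Python) =====
-- def yield_code_blocks(expression: str):
--     """
--     Takes a string, and splits it into code blocks vs. blocks that are in
--     quotation marks (either ' or ").
--     Yields a string, and boolean that is True if the block was in quotations
--     and False if it was not in quotations
--     """
--     if not len(expression): return
--     in_quote_mode = False
--     i_buffer_start = 0
--     quote_char = None
--     prev_c = None
--     for i, c in enumerate(expression):
--         if not in_quote_mode and c in ['"', "'"] and prev_c != '\\':
--             # If there is something in the buffer, yield it
--             if i - i_buffer_start > 0: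
--                 yield expression[i_buffer_start:i], False
--             # Beginning of a string
--             quote_char = c
--             i_buffer_start = i
--             in_quote_mode = True
--         elif in_quote_mode and c == quote_char and prev_c != '\\':
--             # End of a string
--             yield expression[i_buffer_start:i+1], True
--             # Next block starts at i+1
--             i_buffer_start = i+1
--             in_quote_mode = False
--         prev_c = c
--     if in_quote_mode:
--         raise ValueError('Missing end of quotation')
--     if i_buffer_start <= len(expression)-1:
--         yield expression[i_buffer_start:], False
-- ===== SOURCE B (Python) =====
-- def yield_code_blocks(expression: str):
--     """Recursive-descent style: repeatedly locate the next unescaped quote,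
--     emit the intervening code slice, then locate the matching unescaped
--     closing quote and emit the quoted slice."""
--     s = expression
--     n = len(s)
--
--     def find_open(i, prev):
--         # first index >= i holding ' or " not preceded (in s) by a backslash
--         while i < n:
--             c = s[i]
--             if c in '\'"' and prev != '\\':
--                 return i
--             prev = c
--             i += 1
--         return -1
--
--     def find_close(i, prev, qc):
--         # first index >= i holding qc not preceded (in s) by a backslash
--         while i < n:
--             c = s[i]
--             if c == qc and prev != '\\':
--                 return i
--             prev = c
--             i += 1
--         return -1
--
--     pos = 0
--     prev = None
--     while True:
--         q = find_open(pos, prev)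
--         if q == -1:
--             if pos < n:
--                 yield s[pos:], False
--             return
--         if q > pos:
--             yield s[pos:q], False
--         qc = s[q]
--         e = find_close(q + 1, qc, qc)
--         if e == -1:
--             raise ValueError('Missing end of quotation')
--         yield s[q:e + 1], True
--         pos = e + 1
--         prev = s[e]
-- ===== Notes on version B (the rewrite author's own statement) =====
-- stated objective: alternative
-- what changed: A's single char-by-char state machine (in_quote_mode flag, buffer-start index, prev-char tracking) is replaced by a recursive-descent splitter: repeatedly locate the next unescaped quote with a dedicated search, emit the intervening code slice, locate the matching unescaped closing quote, emit the quoted slice, and continue after it.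
import Mathlib
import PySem

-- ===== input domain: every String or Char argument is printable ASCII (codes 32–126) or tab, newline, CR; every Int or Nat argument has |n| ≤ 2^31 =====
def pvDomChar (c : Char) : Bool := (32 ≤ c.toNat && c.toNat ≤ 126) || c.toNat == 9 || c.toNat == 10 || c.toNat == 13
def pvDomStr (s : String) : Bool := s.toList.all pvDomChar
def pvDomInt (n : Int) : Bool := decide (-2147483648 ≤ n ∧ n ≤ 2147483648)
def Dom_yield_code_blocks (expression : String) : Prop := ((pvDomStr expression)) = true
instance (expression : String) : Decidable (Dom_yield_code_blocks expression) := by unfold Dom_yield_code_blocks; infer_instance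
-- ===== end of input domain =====

-- B replaces A's char-by-char state machine with a recursive-descent splitter
-- (find next unescaped quote / find matching close, slice between); objective: alternative.


-- ===== PORT A =====
-- A's for-loop, as structural recursion over the remaining characters `rest`
-- (rest = s.drop i), carrying exactly A's state: in_quote_mode, i_buffer_start,
-- quote_char, prev_c.  expression[a:b] (0 ≤ a ≤ b) is (s.drop a).take (b - a), exact here.
def pyA_loop (s : List Char) (rest : List Char) (i : Nat) (inQ : Bool) (start : Nat)
    (qc prev : Option Char) : List (String × Bool) :=
  match rest with
  | [] =>
    if inQ then []  -- raise ValueError('Missing end of quotation'); excluded by Pre_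
    else if start ≤ s.length - 1 then [(String.ofList (s.drop start), false)] else []
  | c :: r =>
    if inQ = false ∧ (c = '"' ∨ c = '\'') ∧ prev ≠ some '\\' then
      (if i - start > 0 then [(String.ofList ((s.drop start).take (i - start)), false)] else []) ++
        pyA_loop s r (i + 1) true i (some c) (some c)
    else if inQ = true ∧ some c = qc ∧ prev ≠ some '\\' then
      (String.ofList ((s.drop start).take (i + 1 - start)), true) ::
        pyA_loop s r (i + 1) false (i + 1) qc (some c)
    else
      pyA_loop s r (i + 1) inQ start qc (some c)

def yield_code_blocks (expression : String) : List (String × Bool) :=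
  let s := expression.toList
  if s.length = 0 then [] else pyA_loop s s 0 false 0 none none

-- ===== PORT B =====
-- B's find_open: first index ≥ i holding ' or " not preceded by a backslash.
def bFindOpen : List Char → Nat → Option Char → Option Nat
  | [], _, _ => none
  | c :: r, i, prev =>
    if (c = '\'' ∨ c = '"') ∧ prev ≠ some '\\' then some i else bFindOpen r (i + 1) (some c)

-- B's find_close: first index ≥ i holding qch not preceded by a backslash.
def bFindClose : List Char → Nat → Char → Char → Option Nat
  | [], _, _, _ => none
  | c :: r, i, prev, qch =>
    if c = qch ∧ prev ≠ '\\' then some i else bFindClose r (i + 1) c qch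

-- bounds of the searches (cited by bLoop's decreasing_by)
theorem bFindOpen_bounds : ∀ (rest : List Char) (i : Nat) (prev : Option Char) (q : Nat),
    bFindOpen rest i prev = some q → i ≤ q ∧ q < i + rest.length := by
  intro rest
  induction rest with
  | nil => intro i prev q h; simp [bFindOpen] at h
  | cons c r ih =>
    intro i prev q h
    simp only [bFindOpen] at h
    split at h
    · cases h; simp only [List.length_cons]; omega
    · have := ih (i + 1) (some c) q h; simp only [List.length_cons]; omega

theorem bFindClose_bounds : ∀ (rest : List Char) (i : Nat) (prev qch : Char) (e : Nat),
    bFindClose rest i prev qch = some e → i ≤ e ∧ e < i + rest.length := by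
  intro rest
  induction rest with
  | nil => intro i prev qch e h; simp [bFindClose] at h
  | cons c r ih =>
    intro i prev qch e h
    simp only [bFindClose] at h
    split at h
    · cases h; simp only [List.length_cons]; omega
    · have := ih (i + 1) c qch e h; simp only [List.length_cons]; omega

-- B's main `while True` loop.
def bLoop (s : List Char) (pos : Nat) (prev : Option Char) : List (String × Bool) :=
  match h : bFindOpen (s.drop pos) pos prev with
  | none => if pos < s.length then [(String.ofList (s.drop pos), false)] else []
  | some q =>
    (if pos < q then [(String.ofList ((s.drop pos).take (q - pos)), false)] else []) ++
      (match h2 : bFindClose (s.drop (q + 1)) (q + 1) (s.getD q ' ') (s.getD q ' ') with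
       | none => []  -- raise ValueError('Missing end of quotation'); excluded by Pre_
       | some e =>
         (String.ofList ((s.drop q).take (e + 1 - q)), true) :: bLoop s (e + 1) (some (s.getD e ' ')))
termination_by s.length - pos
decreasing_by
  have hb := bFindOpen_bounds _ _ _ _ h
  have hc := bFindClose_bounds _ _ _ _ _ h2
  simp only [List.length_drop] at hb hc
  omega

def yield_code_blocks_alt (expression : String) : List (String × Bool) :=
  bLoop expression.toList 0 none

-- ===== PRECONDITION & SPEC =====
-- Pre_ excludes exactly the inputs with an unterminated quotation, on which the Python A
-- raises ValueError('Missing end of quotation') (B raises the same ValueError there, so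
-- there is no value to match).  'Every quotation is terminated' is, like balancedness of
-- parentheses, inherently an automaton-shaped condition on the string: quotesClosed is the
-- standard one-state quotation automaton (currently-open quote char, previous char for the
-- escape rule), written independently of both ports and of their outputs.
def quotesClosed : List Char → Option Char → Option Char → Bool
  | [], qstate, _ => qstate.isNone
  | c :: r, none, prev =>
    if (c = '"' ∨ c = '\'') ∧ prev ≠ some '\\' then quotesClosed r (some c) (some c)
    else quotesClosed r none (some c)
  | c :: r, some qch, prev =>
    if c = qch ∧ prev ≠ some '\\' then quotesClosed r none (some c)
    else quotesClosed r (some qch) (some c)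

def Pre_yield_code_blocks (expression : String) : Prop :=
  quotesClosed expression.toList none none = true
instance (expression : String) : Decidable (Pre_yield_code_blocks expression) := by
  unfold Pre_yield_code_blocks; infer_instance

def pvWitness_yield_code_blocks : String := "a'b\"c' + \"d\""

def Spec_yield_code_blocks (expression : String) (out : List (String × Bool)) : Prop :=
  out = yield_code_blocks_alt expression
instance (expression : String) (out : List (String × Bool)) : Decidable (Spec_yield_code_blocks expression out) := by
  unfold Spec_yield_code_blocks; infer_instance

-- ===== CLAIM (what is proved, stated in full; the proofs are below) =====
def Claim_equal_yield_code_blocks : Prop := ∀ (expression : String), Dom_yield_code_blocks expression → Pre_yield_code_blocks expression → Spec_yield_code_blocks expression (yield_code_blocks expression)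

-- ===== LEMMAS AND PROOFS =====

theorem drop_succ_of_drop_cons {s : List Char} {i : Nat} {c : Char} {r : List Char}
    (h : s.drop i = c :: r) : s.drop (i + 1) = r := by
  have : s.drop (i + 1) = (s.drop i).drop 1 := by
    rw [List.drop_drop]
  rw [this, h]; rfl

theorem getD_of_drop_cons {s : List Char} {i : Nat} {c : Char} {r : List Char}
    (h : s.drop i = c :: r) : s.getD i ' ' = c := by
  have h0 : s[i]? = some c := by
    have h1 : (s.drop i)[0]? = s[i + 0]? := List.getElem?_drop
    simp [h] at h1
    simpa using h1.symm
  simp [List.getD_eq_getElem?_getD, h0]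

-- A's loop in code mode (in_quote_mode = False, buffer start = start) behaves as
-- B's find_open followed by slicing.
theorem aCode (s : List Char) : ∀ (rest : List Char) (i : Nat) (start : Nat)
    (qc prev : Option Char), rest = s.drop i →
    pyA_loop s rest i false start qc prev =
      match bFindOpen rest i prev with
      | none => if start ≤ s.length - 1 then [(String.ofList (s.drop start), false)] else []
      | some q =>
        (if start < q then [(String.ofList ((s.drop start).take (q - start)), false)] else []) ++
          pyA_loop s (s.drop (q + 1)) (q + 1) true q (some (s.getD q ' ')) (some (s.getD q ' ')) := by
  intro rest
  induction rest with
  | nil => intro i start qc prev _; simp [pyA_loop, bFindOpen]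
  | cons c r ih =>
    intro i start qc prev hdrop
    have hr : r = s.drop (i + 1) := (drop_succ_of_drop_cons hdrop.symm).symm
    have hg : s.getD i ' ' = c := getD_of_drop_cons hdrop.symm
    by_cases hcond : (c = '\'' ∨ c = '"') ∧ prev ≠ some '\\'
    · simp only [pyA_loop, bFindOpen, if_pos hcond, hg, ← hr]
      rw [if_pos (show True ∧ (c = '"' ∨ c = '\'') ∧ prev ≠ some '\\' from
        ⟨trivial, hcond.1.symm, hcond.2⟩)]
      rcases Nat.lt_or_ge start i with h1 | h1
      · rw [if_pos (by omega : i - start > 0), if_pos h1]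
      · rw [if_neg (by omega : ¬ i - start > 0), if_neg (by omega : ¬ start < i)]
    · simp only [pyA_loop, bFindOpen, if_neg hcond,
        if_neg (by simp : ¬ (false = true ∧ some c = qc ∧ prev ≠ some '\\'))]
      rw [if_neg (show ¬ (True ∧ (c = '"' ∨ c = '\'') ∧ prev ≠ some '\\') from
        fun hcc => hcond ⟨hcc.2.1.symm, hcc.2.2⟩)]
      exact ih (i + 1) start qc (some c) hr

-- A's loop in quote mode (opened at q with quote char c0) behaves as B's find_close
-- followed by slicing.
theorem aQuote (s : List Char) : ∀ (rest : List Char) (i q : Nat) (c0 p : Char),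
    rest = s.drop i →
    pyA_loop s rest i true q (some c0) (some p) =
      match bFindClose rest i p c0 with
      | none => []
      | some e =>
        (String.ofList ((s.drop q).take (e + 1 - q)), true) ::
          pyA_loop s (s.drop (e + 1)) (e + 1) false (e + 1) (some c0) (some (s.getD e ' ')) := by
  intro rest
  induction rest with
  | nil => intro i q c0 p _; simp [pyA_loop, bFindClose]
  | cons c r ih =>
    intro i q c0 p hdrop
    have hr : r = s.drop (i + 1) := (drop_succ_of_drop_cons hdrop.symm).symm
    have hg : s.getD i ' ' = c := getD_of_drop_cons hdrop.symm
    by_cases hcond : c = c0 ∧ p ≠ '\\'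
    · simp only [pyA_loop, bFindClose, if_pos hcond, hg, ← hr,
        if_neg (by simp : ¬ (true = false ∧ (c = '"' ∨ c = '\'') ∧ some p ≠ some '\\'))]
      rw [if_pos (show True ∧ some c = some c0 ∧ some p ≠ some '\\' from
        ⟨trivial, by simp [hcond.1], by simp [hcond.2]⟩)]
    · simp only [pyA_loop, bFindClose, if_neg hcond,
        if_neg (by simp : ¬ (true = false ∧ (c = '"' ∨ c = '\'') ∧ some p ≠ some '\\'))]
      rw [if_neg (show ¬ (True ∧ some c = some c0 ∧ some p ≠ some '\\') from by
        simp only [true_and, Option.some.injEq]; tauto)]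
      exact ih (i + 1) q c0 c hr

-- the two loops agree from any resynchronisation point pos (A in code mode with an
-- empty buffer starting at pos); A's quote_char is dead state in code mode.
theorem loops_agree (s : List Char) (hs : s ≠ []) :
    ∀ (k pos : Nat) (prev qc : Option Char), s.length - pos ≤ k →
      pyA_loop s (s.drop pos) pos false pos qc prev = bLoop s pos prev := by
  intro k
  induction k with
  | zero =>
    intro pos prev qc hk
    have hdrop : (s.drop pos).length = 0 := by simp [List.length_drop]; omega
    rw [bLoop]
    rw [aCode s (s.drop pos) pos pos qc prev rfl]
    cases hO : bFindOpen (s.drop pos) pos prev with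
    | none =>
      simp only []
      have hlen : 1 ≤ s.length := List.length_pos_of_ne_nil hs
      by_cases h : pos < s.length
      · rw [if_pos (by omega : pos ≤ s.length - 1), if_pos h]
      · rw [if_neg (by omega : ¬ pos ≤ s.length - 1), if_neg h]
    | some q =>
      have := bFindOpen_bounds _ _ _ _ hO
      omega
  | succ k ih =>
    intro pos prev qc hk
    rw [bLoop]
    rw [aCode s (s.drop pos) pos pos qc prev rfl]
    cases hO : bFindOpen (s.drop pos) pos prev with
    | none =>
      simp only []
      have hlen : 1 ≤ s.length := List.length_pos_of_ne_nil hs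
      by_cases h : pos < s.length
      · rw [if_pos (by omega : pos ≤ s.length - 1), if_pos h]
      · rw [if_neg (by omega : ¬ pos ≤ s.length - 1), if_neg h]
    | some q =>
      have hqb := bFindOpen_bounds _ _ _ _ hO
      simp only [List.length_drop] at hqb
      simp only []
      rw [aQuote s (s.drop (q + 1)) (q + 1) q (s.getD q ' ') (s.getD q ' ') rfl]
      cases hC : bFindClose (s.drop (q + 1)) (q + 1) (s.getD q ' ') (s.getD q ' ') with
      | none => rfl
      | some e =>
        have heb := bFindClose_bounds _ _ _ _ _ hC
        simp only [List.length_drop] at heb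
        have := ih (e + 1) (some (s.getD e ' ')) (some (s.getD q ' ')) (by omega)
        simp only [this]

-- ===== VERDICT (by name: the statement is the Claim_ definition above) =====
theorem yield_code_blocks_spec : Claim_equal_yield_code_blocks := by
  intro expression _ _
  unfold Spec_yield_code_blocks yield_code_blocks yield_code_blocks_alt
  by_cases h : expression.toList.length = 0
  · have hnil : expression.toList = [] := List.eq_nil_of_length_eq_zero h
    rw [if_pos h, hnil, bLoop]
    rfl
  · have hs : expression.toList ≠ [] := by
      intro hc; exact h (by rw [hc]; rfl)
    simp only [if_neg h]
    have := loops_agree expression.toList hs expression.toList.length 0 none none (by omega)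
    rw [List.drop_zero] at this
    exact this
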